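-- pv_equiv track=rewrite | github.com/denkovarik/NFA-to-Regex | utilities.py | removeDupAdditions
-- ===== SOURCE A (Python) =====
-- def removeDupAdditions(subRegexp):
--     """
--     Removes duplicate additions from a regular expression to simplify it. This
--     function serves as a helper function for simpAddition()
--
--     :param subRegexp: Regular expretion to simplify
--     :return: Simplified regular expression with duplicate additions removed
--     """
--     # Search for duplicate terms separated by +
--     ops = set()
--     i = 0
--     plusI = -1
--     plusJ = -1
--     pc = 0
--     exp = ''
--     while i < len(subRegexp):
--         if subRegexp[i] == '(':
--             pc += 1
--         elif subRegexp[i] == ')':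
--             pc -= 1
--
--         if pc == 0 and subRegexp[i] == '+':
--             if plusI == -1:
--                 ops.add(subRegexp[:i])
--                 plusI = i
--                 exp = exp + subRegexp[:i]
--             elif plusI + 1 < len(subRegexp) and i > plusI:
--                 op = subRegexp[plusI+1:i]
--                 if not op in ops:
--                     ops.add(op)
--                     exp = exp + subRegexp[plusI:i]
--                 plusI = i
--         i += 1
--
--     if plusI == -1:
--         ops.add(subRegexp[:i])
--         plusI = i
--         exp = exp + subRegexp[:i]
--     else:
--         op = subRegexp[plusI+1:i]
--         if not op in ops:
--             ops.add(op)
--             exp = exp + subRegexp[plusI:i]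
--             plusI = i
--
--     return exp
-- ===== SOURCE B (Python) =====
-- def removeDupAdditions(subRegexp):
--     """
--     Removes duplicate additions from a regular expression to simplify it.
--
--     Two passes: first cut the expression into its top-level '+'-separated
--     terms (tracking paren depth), then keep only the first occurrence of
--     each term and join them back with '+'.
--     """
--     terms = []
--     cur = []
--     pc = 0
--     for ch in subRegexp:
--         if ch == '(':
--             pc += 1
--         elif ch == ')':
--             pc -= 1
--         if pc == 0 and ch == '+':
--             terms.append(''.join(cur))
--             cur = []
--         else:
--             cur.append(ch)
--     terms.append(''.join(cur))
--
--     seen = set()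
--     unique = []
--     for t in terms:
--         if t not in seen:
--             seen.add(t)
--             unique.append(t)
--     return '+'.join(unique)
-- ===== Notes on version B (the rewrite author's own statement) =====
-- stated objective: simpler
-- what changed: A's single intermixed scan that tracks a last-plus index and rebuilds the output by slicing is replaced by two plain passes: tokenize the string into its top-level plus-separated terms, then keep each term's first occurrence and join them back.
import Mathlib
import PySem

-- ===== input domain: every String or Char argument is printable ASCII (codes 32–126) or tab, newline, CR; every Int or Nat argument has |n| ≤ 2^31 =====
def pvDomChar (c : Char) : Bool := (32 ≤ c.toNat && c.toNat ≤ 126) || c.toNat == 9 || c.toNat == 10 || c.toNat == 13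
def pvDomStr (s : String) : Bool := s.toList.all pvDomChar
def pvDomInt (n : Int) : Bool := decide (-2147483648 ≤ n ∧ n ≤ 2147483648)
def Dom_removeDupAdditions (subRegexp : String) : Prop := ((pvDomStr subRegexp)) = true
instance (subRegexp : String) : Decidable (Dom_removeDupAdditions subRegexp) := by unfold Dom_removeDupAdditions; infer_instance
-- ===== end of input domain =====

-- B replaces A's single scan (last-'+'-index bookkeeping + slicing into a growing output)
-- by two plain passes: tokenize at top-level '+', then first-occurrence dedup and join. Objective: simpler.

-- ===== PORT A =====
-- the 'while i < len(subRegexp)' loop of A, state (ops, plusI, pc, exp); returns the final (ops, plusI, exp)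
def pvLoopA (s : List Char) (i : Nat) (ops : PySem.Set (List Char)) (plusI : Int) (pc : Int)
    (exp : List Char) : PySem.Set (List Char) × Int × List Char :=
  if h : i < s.length then
    let c := s[i]
    let pc' := if c = '(' then pc + 1 else if c = ')' then pc - 1 else pc
    if pc' = 0 ∧ c = '+' then
      if plusI = -1 then
        pvLoopA s (i + 1) (PySem.Set.add ops (PySem.List.slice s none (some (i : Int))))
          (i : Int) pc' (exp ++ PySem.List.slice s none (some (i : Int)))
      else if plusI + 1 < (s.length : Int) ∧ (i : Int) > plusI then
        let op := PySem.List.slice s (some (plusI + 1)) (some (i : Int))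
        if PySem.Set.contains ops op then
          pvLoopA s (i + 1) ops (i : Int) pc' exp
        else
          pvLoopA s (i + 1) (PySem.Set.add ops op) (i : Int) pc'
            (exp ++ PySem.List.slice s (some plusI) (some (i : Int)))
      else
        pvLoopA s (i + 1) ops plusI pc' exp
    else
      pvLoopA s (i + 1) ops plusI pc' exp
  else
    (ops, plusI, exp)
  termination_by s.length - i

def removeDupAdditions (subRegexp : String) : String :=
  let s := subRegexp.toList
  let r := pvLoopA s 0 PySem.Set.empty (-1) 0 []
  let ops := r.1
  let plusI := r.2.1
  let exp := r.2.2
  if plusI = -1 then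
    String.ofList (exp ++ PySem.List.slice s none (some (s.length : Int)))
  else
    let op := PySem.List.slice s (some (plusI + 1)) (some (s.length : Int))
    if PySem.Set.contains ops op then String.ofList exp
    else String.ofList (exp ++ PySem.List.slice s (some plusI) (some (s.length : Int)))

-- ===== PORT B =====
-- first pass of Source B: cut into top-level '+'-separated terms (paren-depth counter pc)
def pvTokB (rest : List Char) (pc : Int) (cur : List Char) (terms : List (List Char)) :
    List (List Char) :=
  match rest with
  | [] => terms ++ [cur]
  | c :: t =>
      let pc' := if c = '(' then pc + 1 else if c = ')' then pc - 1 else pc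
      if pc' = 0 ∧ c = '+' then pvTokB t pc' [] (terms ++ [cur])
      else pvTokB t pc' (cur ++ [c]) terms

-- second pass of Source B: seen-set + ordered list of first occurrences
def pvDedupB (ts : List (List Char)) (seen : PySem.Set (List Char)) (uniq : List (List Char)) :
    List (List Char) :=
  match ts with
  | [] => uniq
  | t :: r =>
      if PySem.Set.contains seen t then pvDedupB r seen uniq
      else pvDedupB r (PySem.Set.add seen t) (uniq ++ [t])

def removeDupAdditions_alt (subRegexp : String) : String :=
  let terms := pvTokB subRegexp.toList 0 [] []
  let uniq := pvDedupB terms PySem.Set.empty []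
  String.ofList (PySem.Chars.join ['+'] uniq)

-- ===== PRECONDITION & SPEC =====
def Spec_removeDupAdditions (subRegexp : String) (out : String) : Prop := out = removeDupAdditions_alt subRegexp
instance (subRegexp : String) (out : String) : Decidable (Spec_removeDupAdditions subRegexp out) := by unfold Spec_removeDupAdditions; infer_instance

-- ===== CLAIM (what is proved, stated in full; the proofs are below) =====
def Claim_equal_removeDupAdditions : Prop := ∀ (subRegexp : String), Dom_removeDupAdditions subRegexp → Spec_removeDupAdditions subRegexp (removeDupAdditions subRegexp)

-- ===== LEMMAS AND PROOFS =====

-- structural reference version of A's loop together with its post-loop code: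
-- cur is the current (partial) term, first says no top-level '+' has been seen yet
def pvRunA (rest : List Char) (pc : Int) (cur : List Char) (ops : PySem.Set (List Char))
    (first : Bool) (exp : List Char) : List Char :=
  match rest with
  | [] =>
      if first then exp ++ cur
      else if PySem.Set.contains ops cur then exp else exp ++ '+' :: cur
  | c :: t =>
      let pc' := if c = '(' then pc + 1 else if c = ')' then pc - 1 else pc
      if pc' = 0 ∧ c = '+' then
        if first then pvRunA t pc' [] (PySem.Set.add ops cur) false (exp ++ cur)
        else if PySem.Set.contains ops cur then pvRunA t pc' [] ops false exp
        else pvRunA t pc' [] (PySem.Set.add ops cur) false (exp ++ '+' :: cur)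
      else pvRunA t pc' (cur ++ [c]) ops first exp

-- emit the still-unseen terms, '+'-prefixed, onto exp
def pvEmit (ops : PySem.Set (List Char)) (ts : List (List Char)) (exp : List Char) : List Char :=
  match ts with
  | [] => exp
  | t :: r =>
      if PySem.Set.contains ops t then pvEmit ops r exp
      else pvEmit (PySem.Set.add ops t) r (exp ++ '+' :: t)

theorem pvTokB_acc (rest : List Char) (pc : Int) (cur : List Char) (terms : List (List Char)) :
    pvTokB rest pc cur terms = terms ++ pvTokB rest pc cur [] := by
  induction rest generalizing pc cur terms with
  | nil => simp [pvTokB]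
  | cons c t ih =>
      simp only [pvTokB]
      by_cases hc : (if c = '(' then pc + 1 else if c = ')' then pc - 1 else pc) = 0 ∧ c = '+'
      · simp only [if_pos hc]
        rw [ih, ih _ _ ([] ++ [cur])]; simp
      · simp only [if_neg hc]
        apply ih

theorem pvRunA_notFirst (rest : List Char) (pc : Int) (cur : List Char)
    (ops : PySem.Set (List Char)) (exp : List Char) :
    pvRunA rest pc cur ops false exp = pvEmit ops (pvTokB rest pc cur []) exp := by
  induction rest generalizing pc cur ops exp with
  | nil => simp [pvRunA, pvTokB, pvEmit]
  | cons c t ih =>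
      simp only [pvRunA, pvTokB]
      by_cases hc : (if c = '(' then pc + 1 else if c = ')' then pc - 1 else pc) = 0 ∧ c = '+'
      · simp only [if_pos hc]
        rw [pvTokB_acc t _ [] ([] ++ [cur])]
        simp only [List.nil_append, List.cons_append, pvEmit, Bool.false_eq_true, reduceIte]
        split
        · exact ih ..
        · exact ih ..
      · simp only [if_neg hc]
        apply ih

theorem pvRunA_first (rest : List Char) (pc : Int) (cur : List Char) (exp : List Char) :
    pvRunA rest pc cur PySem.Set.empty true exp =
      match pvTokB rest pc cur [] with
      | [] => exp
      | t :: r => pvEmit (PySem.Set.add PySem.Set.empty t) r (exp ++ t) := by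
  induction rest generalizing pc cur exp with
  | nil => simp [pvRunA, pvTokB, pvEmit]
  | cons c t ih =>
      simp only [pvRunA, pvTokB]
      by_cases hc : (if c = '(' then pc + 1 else if c = ')' then pc - 1 else pc) = 0 ∧ c = '+'
      · simp only [if_pos hc]
        rw [pvTokB_acc t _ [] ([] ++ [cur])]
        simp only [List.nil_append, List.cons_append, reduceIte]
        exact pvRunA_notFirst ..
      · simp only [if_neg hc]
        apply ih

theorem pvJoin_append_singleton (uniq : List (List Char)) (t : List Char) (h : uniq ≠ []) :
    PySem.Chars.join ['+'] (uniq ++ [t]) = PySem.Chars.join ['+'] uniq ++ '+' :: t := by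
  induction uniq with
  | nil => simp at h
  | cons u us ih =>
      cases us with
      | nil => simp [PySem.Chars.join_cons_cons, PySem.Chars.join_singleton]
      | cons v vs =>
          simp only [List.cons_append, PySem.Chars.join_cons_cons]
          rw [← List.cons_append, ih (by simp)]
          simp

theorem pvEmit_join (ts : List (List Char)) (seen : PySem.Set (List Char))
    (uniq : List (List Char)) (h : uniq ≠ []) :
    pvEmit seen ts (PySem.Chars.join ['+'] uniq) =
      PySem.Chars.join ['+'] (pvDedupB ts seen uniq) := by
  induction ts generalizing seen uniq with
  | nil => simp [pvEmit, pvDedupB]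
  | cons t r ih =>
      simp only [pvEmit, pvDedupB]
      split
      · exact ih _ _ h
      · rw [← pvJoin_append_singleton _ _ h, ih _ _ (by simp)]

-- the post-loop code of A
def pvFinish (s : List Char) (r : PySem.Set (List Char) × Int × List Char) : List Char :=
  if r.2.1 = -1 then r.2.2 ++ PySem.List.slice s none (some (s.length : Int))
  else if PySem.Set.contains r.1
         (PySem.List.slice s (some (r.2.1 + 1)) (some (s.length : Int))) then r.2.2
  else r.2.2 ++ PySem.List.slice s (some r.2.1) (some (s.length : Int))

-- s[p:b] = '+' :: s[p+1:b] when s[p] = '+'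
theorem pvSlice_plus_cons (s : List Char) (p b : Nat) (hpb : p < b) (hp : s[p]? = some '+') :
    PySem.List.slice s (some (p : Int)) (some (b : Int)) =
      '+' :: PySem.List.slice s (some ((p : Int) + 1)) (some (b : Int)) := by
  obtain ⟨hpl, hval⟩ := List.getElem?_eq_some_iff.mp hp
  rw [show ((p : Int) + 1) = (((p + 1 : Nat)) : Int) by push_cast; ring]
  rw [PySem.List.slice_natCast, PySem.List.slice_natCast]
  rw [List.drop_eq_getElem_cons hpl, show b - p = (b - (p + 1)) + 1 by omega,
    List.take_succ_cons, hval]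

-- s[a:i+1] = s[a:i] ++ [s[i]]
theorem pvSlice_snoc (s : List Char) (a i : Nat) (ha : a ≤ i) (hi : i < s.length) :
    PySem.List.slice s (some (a : Int)) (some ((i : Int) + 1)) =
      PySem.List.slice s (some (a : Int)) (some (i : Int)) ++ [s[i]] := by
  rw [show ((i : Int) + 1) = (((i + 1 : Nat)) : Int) by push_cast; ring]
  rw [PySem.List.slice_natCast, PySem.List.slice_natCast,
    show i + 1 - a = (i - a) + 1 by omega, List.take_add_one]
  congr 1
  rw [List.getElem?_drop, show a + (i - a) = i by omega,
    List.getElem?_eq_getElem hi]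
  rfl

-- s[a:a] = []
theorem pvSlice_self (s : List Char) (a : Nat) :
    PySem.List.slice s (some (a : Int)) (some (a : Int)) = [] := by
  rw [PySem.List.slice_natCast]; simp

-- bridge from A's index-and-slice loop (plus its post-loop code) to the structural pvRunA
theorem pvLoopA_bridge (s : List Char) (k : Nat) :
    ∀ i, s.length - i = k → i ≤ s.length → ∀ (ops : PySem.Set (List Char)) (pc : Int)
      (exp : List Char),
    (pvFinish s (pvLoopA s i ops (-1) pc exp) = pvRunA (s.drop i) pc (s.take i) ops true exp) ∧
    (∀ p : Nat, p < i → s[p]? = some '+' →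
      pvFinish s (pvLoopA s i ops (p : Int) pc exp) =
        pvRunA (s.drop i) pc (PySem.List.slice s (some ((p : Int) + 1)) (some (i : Int)))
          ops false exp) := by
  induction k with
  | zero =>
      intro i hk hi ops pc exp
      have hil : i = s.length := by omega
      subst hil
      constructor
      · rw [pvLoopA, dif_neg (lt_irrefl _)]
        simp [pvFinish, pvRunA, PySem.List.slice_to_natCast]
      · intro p hp hsp
        rw [pvLoopA, dif_neg (lt_irrefl _)]
        have hpne : ¬ ((p : Int) = -1) := by omega
        simp only [pvFinish, pvRunA, List.drop_length, if_neg hpne,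
          Bool.false_eq_true, reduceIte]
        rw [pvSlice_plus_cons s p s.length hp hsp]
  | succ k ihk =>
      intro i hk hi ops pc exp
      have hlt : i < s.length := by omega
      have ih := ihk (i + 1) (by omega) (by omega)
      constructor
      · rw [pvLoopA, dif_pos hlt, List.drop_eq_getElem_cons hlt]
        simp only [pvRunA, reduceIte]
        by_cases hcond :
            (if s[i] = '(' then pc + 1 else if s[i] = ')' then pc - 1 else pc) = 0 ∧ s[i] = '+'
        · simp only [if_pos hcond]
          rw [(ih _ _ _).2 i (by omega) (by rw [List.getElem?_eq_getElem hlt, hcond.2])]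
          rw [show ((i : Int) + 1) = (((i + 1 : Nat)) : Int) by push_cast; ring]
          rw [pvSlice_self s (i + 1), PySem.List.slice_to_natCast]
        · simp only [if_neg hcond]
          rw [(ih _ _ _).1, List.take_add_one, List.getElem?_eq_getElem hlt]
          rfl
      · intro p hp hsp
        rw [pvLoopA, dif_pos hlt, List.drop_eq_getElem_cons hlt]
        simp only [pvRunA, Bool.false_eq_true, reduceIte]
        have hpne : ¬ ((p : Int) = -1) := by omega
        by_cases hcond :
            (if s[i] = '(' then pc + 1 else if s[i] = ')' then pc - 1 else pc) = 0 ∧ s[i] = '+'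
        · simp only [if_pos hcond, if_neg hpne]
          have hcond2 : (p : Int) + 1 < (s.length : Int) ∧ (i : Int) > (p : Int) := by omega
          rw [if_pos hcond2]
          have hsi : s[i]? = some '+' := by rw [List.getElem?_eq_getElem hlt, hcond.2]
          by_cases hmem : PySem.Set.contains ops
              (PySem.List.slice s (some ((p : Int) + 1)) (some (i : Int))) = true
          · simp only [if_pos hmem]
            rw [(ih _ _ _).2 i (by omega) hsi]
            rw [show ((i : Int) + 1) = (((i + 1 : Nat)) : Int) by push_cast; ring]
            rw [pvSlice_self s (i + 1)]
          · simp only [hmem, if_false, Bool.false_eq_true]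
            rw [(ih _ _ _).2 i (by omega) hsi]
            rw [show ((i : Int) + 1) = (((i + 1 : Nat)) : Int) by push_cast; ring]
            rw [pvSlice_self s (i + 1), pvSlice_plus_cons s p i hp hsp]
        · simp only [if_neg hcond]
          rw [(ih _ _ _).2 p (by omega) hsp]
          have hsn := pvSlice_snoc s (p + 1) i (by omega) hlt
          push_cast at hsn ⊢
          rw [hsn]

theorem pvTokB_ne_nil (rest : List Char) (pc : Int) (cur : List Char) :
    pvTokB rest pc cur [] ≠ [] := by
  induction rest generalizing pc cur with
  | nil => simp [pvTokB]
  | cons c t ih =>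
      simp only [pvTokB]
      by_cases hc : (if c = '(' then pc + 1 else if c = ')' then pc - 1 else pc) = 0 ∧ c = '+'
      · simp only [if_pos hc]
        rw [pvTokB_acc]
        simp
      · simp only [if_neg hc]
        apply ih

-- ===== VERDICT (by name: the statement is the Claim_ definition above) =====
theorem removeDupAdditions_spec : Claim_equal_removeDupAdditions := by
  intro subRegexp _
  show removeDupAdditions subRegexp = removeDupAdditions_alt subRegexp
  have hA : removeDupAdditions subRegexp =
      String.ofList (pvFinish subRegexp.toList
        (pvLoopA subRegexp.toList 0 PySem.Set.empty (-1) 0 [])) := by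
    simp only [removeDupAdditions, pvFinish]
    split
    · rfl
    · split <;> rfl
  have hb : pvFinish subRegexp.toList (pvLoopA subRegexp.toList 0 PySem.Set.empty (-1) 0 []) =
      pvRunA subRegexp.toList 0 [] PySem.Set.empty true [] := by
    have h := (pvLoopA_bridge subRegexp.toList subRegexp.toList.length 0 (by omega) (by omega)
      PySem.Set.empty 0 []).1
    simpa using h
  rw [hA, hb, pvRunA_first]
  rcases h : pvTokB subRegexp.toList 0 [] [] with _ | ⟨t, r⟩
  · exact absurd h (pvTokB_ne_nil _ _ _)
  · show String.ofList (pvEmit (PySem.Set.add PySem.Set.empty t) r ([] ++ t))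
        = removeDupAdditions_alt subRegexp
    have hB : removeDupAdditions_alt subRegexp =
        String.ofList (PySem.Chars.join ['+']
          (pvDedupB (pvTokB subRegexp.toList 0 [] []) PySem.Set.empty [])) := rfl
    rw [hB, h]
    simp only [pvDedupB, show PySem.Set.contains PySem.Set.empty t = false from rfl,
      Bool.false_eq_true, if_false]
    simp only [List.nil_append]
    rw [← pvEmit_join r (PySem.Set.add PySem.Set.empty t) [t] (by simp),
      PySem.Chars.join_singleton]
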